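-- pv_equiv track=rewrite | github.com/Fondamenti18/fondamenti-di-programmazione | students/1808746/homework04/program01.py | genera_ricors
-- ===== SOURCE A (Python) =====
-- def genera_ricors(diz, x, nuovoDiz):
--     '''Funzione ricorsiva della funzione genera_sottoalbero:
--     A partire da un dizionario diz, restituisce il sotto-dizionario nuovoDiz la cui radice è l'identificativo x attraverso una ricorsione.'''
--
--     if x in diz.keys():
--         nuovoDiz[x]=diz[x] #crea nel nuovoDiz il nodo corrispondente all'identificativo sottoforma di chiave-attributo del vecchio
--         for subNodo in diz[x]: #scorre la lista-attributo del nodo appena aggiunto nel dizionario vecchio e riesegue la procedura con i nuovi identificativi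
--             genera_ricors(diz, subNodo, nuovoDiz)
--         return nuovoDiz
--
--     #in caso l'identificativo non sia nel dizionario, significa che si è arrivati alla fine della ricerca
--     else:
--         return nuovoDiz
-- ===== SOURCE B (Python) =====
-- def genera_ricors(diz, x, nuovoDiz):
--     # Iterative DFS with an explicit stack and a visited set: each key is
--     # processed once (A's recursion re-walks shared subtrees).  Mutates the
--     # passed-in nuovoDiz, like A, and returns the same object.
--     stack = [x]
--     visited = set()
--     while stack:
--         n = stack.pop()
--         if n in visited:
--             continue
--         if n in diz:
--             visited.add(n)
--             nuovoDiz[n] = diz[n]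
--             stack.extend(reversed(diz[n]))
--     return nuovoDiz
-- ===== Notes on version B (the rewrite author's own statement) =====
-- stated objective: alternative
-- what changed: Replaces A's naive recursion with an iterative explicit-stack DFS that keeps a visited set, so every key is handled once instead of re-walking shared subtrees (and the loop also terminates on cyclic inputs, where A overflows the recursion stack).
-- crash fix: On inputs where a node lying on a directed cycle of diz is reachable from x, A recurses forever and raises RecursionError; B visits every key at most once and returns the subtree dictionary. — e.g. on genera_ricors([(0, [0])], 0, []): A raises RecursionError, B returns [(0, [0])]
import Mathlib
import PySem

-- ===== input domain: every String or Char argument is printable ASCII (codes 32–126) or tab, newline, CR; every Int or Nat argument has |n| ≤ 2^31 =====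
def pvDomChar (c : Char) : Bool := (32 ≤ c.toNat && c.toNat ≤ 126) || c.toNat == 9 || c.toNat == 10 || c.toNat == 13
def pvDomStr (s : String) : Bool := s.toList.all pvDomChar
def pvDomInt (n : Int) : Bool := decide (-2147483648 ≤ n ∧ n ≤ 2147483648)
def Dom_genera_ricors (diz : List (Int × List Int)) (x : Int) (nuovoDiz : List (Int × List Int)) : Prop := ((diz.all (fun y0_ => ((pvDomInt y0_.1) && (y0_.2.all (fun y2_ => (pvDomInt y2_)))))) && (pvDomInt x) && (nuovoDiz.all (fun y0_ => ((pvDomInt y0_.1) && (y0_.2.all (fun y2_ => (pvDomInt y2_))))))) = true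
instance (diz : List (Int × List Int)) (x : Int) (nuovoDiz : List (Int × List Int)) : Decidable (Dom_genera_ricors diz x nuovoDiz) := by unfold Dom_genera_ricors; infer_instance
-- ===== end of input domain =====

-- B replaces A's naive recursion (which re-walks shared subtrees and has no cycle guard) by an
-- iterative stack DFS with a visited set; in Python both mutate the passed-in nuovoDiz identically
-- and return it — the equivalence proved here is about the returned dictionary.

-- ===== PORT A =====
-- Literal port of A's recursion. The Nat argument is a fuel/totality guard only:
-- Pre_ (no cycle reachable from x) keeps the recursion depth below diz.length + 2.
def genAux (diz : PySem.Dict Int (List Int)) : Nat → Int → PySem.Dict Int (List Int) → PySem.Dict Int (List Int)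
  | 0, _, nuovo => nuovo
  | f + 1, x, nuovo =>
    match diz.get? x with
    | some v => v.foldl (fun acc c => genAux diz f c acc) (nuovo.insert x v)
    | none => nuovo

def genera_ricors (diz : List (Int × List Int)) (x : Int) (nuovoDiz : List (Int × List Int)) : List (Int × List Int) :=
  (genAux (PySem.Dict.mk diz) (diz.length + 2) x (PySem.Dict.mk nuovoDiz)).items

-- ===== PORT B =====
-- Port of B's while-loop: explicit stack (head = top; Python pushes the reversed child list and
-- pops from the end, i.e. the child list is prepended) plus a visited set. The fuel bounds the
-- number of loop iterations on every input (each iteration pops one entry, and each key pushes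
-- its children only once).
def bFuel (diz : List (Int × List Int)) : Nat :=
  diz.foldl (fun a p => a + 1 + p.2.length) 0 + 2

def bLoop (diz : PySem.Dict Int (List Int)) : Nat → List Int → PySem.Set Int → PySem.Dict Int (List Int) → PySem.Set Int × PySem.Dict Int (List Int)
  | 0, _, visited, nuovo => (visited, nuovo)
  | _ + 1, [], visited, nuovo => (visited, nuovo)
  | f + 1, n :: stack, visited, nuovo =>
    if PySem.Set.contains visited n then
      bLoop diz f stack visited nuovo
    else
      match diz.get? n with
      | some v => bLoop diz f (v ++ stack) (PySem.Set.add visited n) (nuovo.insert n v)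
      | none => bLoop diz f stack visited nuovo

def genera_ricors_alt (diz : List (Int × List Int)) (x : Int) (nuovoDiz : List (Int × List Int)) : List (Int × List Int) :=
  ((bLoop (PySem.Dict.mk diz) (bFuel diz) [x] PySem.Set.empty (PySem.Dict.mk nuovoDiz)).2).items

-- ===== PRECONDITION & SPEC =====
-- Reachability closure of the child graph of diz, computed by saturation.
def childD (diz : PySem.Dict Int (List Int)) (n : Int) : List Int := (diz.get? n).getD []

def addNew (a cs : List Int) : List Int := cs.foldl (fun a c => if c ∈ a then a else a ++ [c]) a

def satStep (diz : PySem.Dict Int (List Int)) (X : List Int) : List Int :=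
  X.foldl (fun acc n => addNew acc (childD diz n)) X

def satN (diz : PySem.Dict Int (List Int)) : Nat → List Int → List Int
  | 0, S => S
  | k + 1, S => satStep diz (satN diz k S)

def allNodes (diz : PySem.Dict Int (List Int)) : List Int := diz.items.flatMap (fun p => p.1 :: p.2)

def satFuel (diz : PySem.Dict Int (List Int)) : Nat := (allNodes diz).length + 1

-- nodes reachable from n (n included)
def reachR (diz : PySem.Dict Int (List Int)) (n : Int) : List Int := satN diz (satFuel diz) [n]

-- nodes reachable from n through at least one edge
def reachP (diz : PySem.Dict Int (List Int)) (n : Int) : List Int :=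
  satN diz (satFuel diz) (PySem.List.dedup (childD diz n))

-- Pre_: exactly the inputs on which A's recursion terminates — no node reachable from x lies on
-- a directed cycle of diz; on the excluded inputs Python A raises RecursionError.
def Pre_genera_ricors (diz : List (Int × List Int)) (x : Int) (nuovoDiz : List (Int × List Int)) : Prop :=
  ∀ k ∈ reachR (PySem.Dict.mk diz) x, k ∉ reachP (PySem.Dict.mk diz) k
instance (diz : List (Int × List Int)) (x : Int) (nuovoDiz : List (Int × List Int)) : Decidable (Pre_genera_ricors diz x nuovoDiz) := by unfold Pre_genera_ricors; infer_instance

def pvWitness_genera_ricors : (List (Int × List Int)) × Int × (List (Int × List Int)) :=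
  ([(1, [2, 3]), (2, [3])], 1, [(7, [])])

-- On inputs where a node on a directed cycle is reachable from x, A recurses forever and raises
-- RecursionError; B visits every key at most once and returns the subtree dictionary.
def Raises_genera_ricors (diz : List (Int × List Int)) (x : Int) (nuovoDiz : List (Int × List Int)) : Prop :=
  ∃ k ∈ reachR (PySem.Dict.mk diz) x, k ∈ reachP (PySem.Dict.mk diz) k
instance (diz : List (Int × List Int)) (x : Int) (nuovoDiz : List (Int × List Int)) : Decidable (Raises_genera_ricors diz x nuovoDiz) := by unfold Raises_genera_ricors; infer_instance

def pvRaiseWitness_genera_ricors : (List (Int × List Int)) × Int × (List (Int × List Int)) :=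
  ([(0, [0])], 0, [])
def pvRaiseWitnessOut_genera_ricors : List (Int × List Int) := [(0, [0])]

def Spec_genera_ricors (diz : List (Int × List Int)) (x : Int) (nuovoDiz : List (Int × List Int)) (out : List (Int × List Int)) : Prop := out = genera_ricors_alt diz x nuovoDiz
instance (diz : List (Int × List Int)) (x : Int) (nuovoDiz : List (Int × List Int)) (out : List (Int × List Int)) : Decidable (Spec_genera_ricors diz x nuovoDiz out) := by unfold Spec_genera_ricors; infer_instance

-- ===== CLAIM (what is proved, stated in full; the proofs are below) =====
def Claim_equal_genera_ricors : Prop := ∀ (diz : List (Int × List Int)) (x : Int) (nuovoDiz : List (Int × List Int)), Dom_genera_ricors diz x nuovoDiz → Pre_genera_ricors diz x nuovoDiz → Spec_genera_ricors diz x nuovoDiz (genera_ricors diz x nuovoDiz)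

def Claim_raises_genera_ricors : Prop := (∀ (diz : List (Int × List Int)) (x : Int) (nuovoDiz : List (Int × List Int)), Dom_genera_ricors diz x nuovoDiz → Raises_genera_ricors diz x nuovoDiz → ¬ Pre_genera_ricors diz x nuovoDiz) ∧ (Dom_genera_ricors (pvRaiseWitness_genera_ricors.1) (pvRaiseWitness_genera_ricors.2.1) (pvRaiseWitness_genera_ricors.2.2) ∧ Raises_genera_ricors (pvRaiseWitness_genera_ricors.1) (pvRaiseWitness_genera_ricors.2.1) (pvRaiseWitness_genera_ricors.2.2) ∧ genera_ricors_alt (pvRaiseWitness_genera_ricors.1) (pvRaiseWitness_genera_ricors.2.1) (pvRaiseWitness_genera_ricors.2.2) = pvRaiseWitnessOut_genera_ricors)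

-- ===== LEMMAS AND PROOFS =====

lemma pv_setc_iff (vis : PySem.Set Int) (n : Int) : PySem.Set.contains vis n = true ↔ n ∈ vis := by
  simp [PySem.Set.contains]

lemma pv_setc_false {vis : PySem.Set Int} {n : Int} (h : n ∉ vis) :
    PySem.Set.contains vis n = false := by
  cases hb : PySem.Set.contains vis n
  · rfl
  · exact absurd ((pv_setc_iff vis n).1 hb) h

-- canonical memoized DFS, the bridge between the two ports (proof-only)
def visitC (diz : PySem.Dict Int (List Int)) : Nat → Int → PySem.Set Int × PySem.Dict Int (List Int) → PySem.Set Int × PySem.Dict Int (List Int)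
  | 0, _, st => st
  | f + 1, n, st =>
    if PySem.Set.contains st.1 n then st
    else
      match diz.get? n with
      | some v => v.foldl (fun st' c => visitC diz f c st') (st.1 ++ [n], st.2.insert n v)
      | none => st

lemma pv_visitC_skip (diz : PySem.Dict Int (List Int)) (f : Nat) (n : Int) (vis : PySem.Set Int)
    (d : PySem.Dict Int (List Int)) (hv : n ∈ vis) : visitC diz (f + 1) n (vis, d) = (vis, d) := by
  simp only [visitC]
  simp [hv]

lemma pv_visitC_none (diz : PySem.Dict Int (List Int)) (f : Nat) (n : Int) (vis : PySem.Set Int)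
    (d : PySem.Dict Int (List Int)) (hn : n ∉ vis) (hget : diz.get? n = none) :
    visitC diz (f + 1) n (vis, d) = (vis, d) := by
  simp only [visitC]
  simp [hn, hget]

lemma pv_visitC_step (diz : PySem.Dict Int (List Int)) (f : Nat) (n : Int) (vis : PySem.Set Int)
    (d : PySem.Dict Int (List Int)) (v : List Int) (hn : n ∉ vis) (hget : diz.get? n = some v) :
    visitC diz (f + 1) n (vis, d)
      = v.foldl (fun st' c => visitC diz f c st') (vis ++ [n], d.insert n v) := by
  simp only [visitC]
  simp [hn, hget]

-- ---- addNew / satStep basics ----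

lemma pv_addNew_append (cs : List Int) : ∀ a : List Int, ∃ r, addNew a cs = a ++ r := by
  induction cs with
  | nil => intro a; exact ⟨[], by simp [addNew]⟩
  | cons c t ih =>
    intro a
    by_cases h : c ∈ a
    · obtain ⟨r, hr⟩ := ih a
      exact ⟨r, by simpa [addNew, h] using hr⟩
    · obtain ⟨r, hr⟩ := ih (a ++ [c])
      exact ⟨[c] ++ r, by simp [addNew, h] at hr ⊢; simpa using hr⟩

lemma pv_subset_addNew (a cs : List Int) : ∀ z ∈ a, z ∈ addNew a cs := by
  obtain ⟨r, hr⟩ := pv_addNew_append cs a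
  intro z hz; rw [hr]; exact List.mem_append_left _ hz

lemma pv_mem_addNew (cs : List Int) : ∀ (a : List Int) (c : Int), c ∈ cs → c ∈ addNew a cs := by
  induction cs with
  | nil => intro a c h; cases h
  | cons c' t ih =>
    intro a c hc
    rcases List.mem_cons.1 hc with rfl | hct
    · have h1 : c ∈ (if c ∈ a then a else a ++ [c]) := by
        by_cases h : c ∈ a <;> simp [h]
      have hstep : addNew a (c :: t) = addNew (if c ∈ a then a else a ++ [c]) t := by
        by_cases h : c ∈ a <;> simp [addNew, h]
      rw [hstep]; exact pv_subset_addNew _ _ _ h1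
    · have hstep : addNew a (c' :: t) = addNew (if c' ∈ a then a else a ++ [c']) t := by
        by_cases h : c' ∈ a <;> simp [addNew, h]
      rw [hstep]; exact ih _ _ hct

lemma pv_forall_addNew (P : Int → Prop) (cs : List Int) :
    ∀ a : List Int, (∀ z ∈ a, P z) → (∀ z ∈ cs, P z) → ∀ z ∈ addNew a cs, P z := by
  induction cs with
  | nil => intro a ha _ z hz; exact ha z hz
  | cons c t ih =>
    intro a ha hcs z hz
    have hstep : addNew a (c :: t) = addNew (if c ∈ a then a else a ++ [c]) t := by
      by_cases h : c ∈ a <;> simp [addNew, h]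
    rw [hstep] at hz
    refine ih _ ?_ (fun w hw => hcs w (List.mem_cons_of_mem _ hw)) z hz
    intro w hw
    by_cases h : c ∈ a
    · simp only [h, if_true] at hw; exact ha w hw
    · simp only [h, if_false] at hw
      rcases List.mem_append.1 hw with hw | hw
      · exact ha w hw
      · simp at hw; rw [hw]; exact hcs _ (List.mem_cons_self ..)

lemma pv_nodup_addNew (cs : List Int) : ∀ a : List Int, a.Nodup → (addNew a cs).Nodup := by
  induction cs with
  | nil => intro a h; exact h
  | cons c t ih =>
    intro a ha
    have hstep : addNew a (c :: t) = addNew (if c ∈ a then a else a ++ [c]) t := by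
      by_cases h : c ∈ a <;> simp [addNew, h]
    rw [hstep]
    by_cases h : c ∈ a
    · simp only [h, if_true]; exact ih a ha
    · simp only [h, if_false]
      refine ih _ ?_
      rw [List.nodup_append]
      refine ⟨ha, by simp, ?_⟩
      intro a1 h1 b hb
      simp at hb
      rw [hb]
      exact fun heq => h (heq ▸ h1)

lemma pv_foldl_addNew_append (diz : PySem.Dict Int (List Int)) (l : List Int) :
    ∀ a : List Int, ∃ r, l.foldl (fun acc n => addNew acc (childD diz n)) a = a ++ r := by
  induction l with
  | nil => intro a; exact ⟨[], by simp⟩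
  | cons n t ih =>
    intro a
    obtain ⟨r1, hr1⟩ := pv_addNew_append (childD diz n) a
    obtain ⟨r2, hr2⟩ := ih (addNew a (childD diz n))
    refine ⟨r1 ++ r2, ?_⟩
    rw [List.foldl_cons, hr2, hr1, List.append_assoc]

lemma pv_subset_foldl_addNew (diz : PySem.Dict Int (List Int)) (l a : List Int) :
    ∀ z ∈ a, z ∈ l.foldl (fun acc n => addNew acc (childD diz n)) a := by
  obtain ⟨r, hr⟩ := pv_foldl_addNew_append diz l a
  intro z hz; rw [hr]; exact List.mem_append_left _ hz

lemma pv_mem_satStep_child (diz : PySem.Dict Int (List Int)) (l : List Int) :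
    ∀ (a : List Int) (n c : Int), n ∈ l → c ∈ childD diz n →
      c ∈ l.foldl (fun acc m => addNew acc (childD diz m)) a := by
  induction l with
  | nil => intro a n c h; cases h
  | cons m t ih =>
    intro a n c hn hc
    rcases List.mem_cons.1 hn with rfl | hnt
    · rw [List.foldl_cons]
      exact pv_subset_foldl_addNew diz t _ _ (pv_mem_addNew _ _ _ hc)
    · rw [List.foldl_cons]; exact ih _ n c hnt hc

lemma pv_forall_foldl_addNew (diz : PySem.Dict Int (List Int)) (P : Int → Prop)
    (hcl : ∀ z, P z → ∀ c ∈ childD diz z, P c) (l : List Int) :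
    ∀ a : List Int, (∀ z ∈ a, P z) → (∀ z ∈ l, P z) →
      ∀ z ∈ l.foldl (fun acc n => addNew acc (childD diz n)) a, P z := by
  induction l with
  | nil => intro a ha _ z hz; exact ha z hz
  | cons n t ih =>
    intro a ha hl z hz
    rw [List.foldl_cons] at hz
    refine ih _ ?_ (fun w hw => hl w (List.mem_cons_of_mem _ hw)) z hz
    exact pv_forall_addNew P _ _ ha (hcl n (hl n (List.mem_cons_self ..)))

lemma pv_satStep_append (diz : PySem.Dict Int (List Int)) (X : List Int) :
    ∃ r, satStep diz X = X ++ r := pv_foldl_addNew_append diz X X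

lemma pv_subset_satStep (diz : PySem.Dict Int (List Int)) (X : List Int) :
    ∀ z ∈ X, z ∈ satStep diz X := pv_subset_foldl_addNew diz X X

lemma pv_satStep_child (diz : PySem.Dict Int (List Int)) (X : List Int) (n c : Int)
    (hn : n ∈ X) (hc : c ∈ childD diz n) : c ∈ satStep diz X :=
  pv_mem_satStep_child diz X X n c hn hc

lemma pv_nodup_foldl_addNew (diz : PySem.Dict Int (List Int)) (l : List Int) :
    ∀ a : List Int, a.Nodup → (l.foldl (fun acc n => addNew acc (childD diz n)) a).Nodup := by
  induction l with
  | nil => intro a h; exact h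
  | cons n t ih => intro a ha; rw [List.foldl_cons]; exact ih _ (pv_nodup_addNew _ _ ha)

lemma pv_childD_subset_allNodes (diz : PySem.Dict Int (List Int)) (n : Int) :
    ∀ c ∈ childD diz n, c ∈ allNodes diz := by
  intro c hc
  unfold childD at hc
  cases hget : diz.get? n with
  | none => rw [hget] at hc; simp at hc
  | some v =>
    rw [hget] at hc; simp at hc
    have hmem : (n, v) ∈ diz.items := PySem.Dict.mem_items_of_get?_eq_some _ hget
    exact List.mem_flatMap.2 ⟨(n, v), hmem, by simp [hc]⟩

lemma pv_satN_subset (diz : PySem.Dict Int (List Int)) (k : Nat) (X : List Int) :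
    ∀ z ∈ X, z ∈ satN diz k X := by
  induction k with
  | zero => intro z hz; exact hz
  | succ k ih => intro z hz; exact pv_subset_satStep diz _ _ (ih z hz)

lemma pv_satN_forall (diz : PySem.Dict Int (List Int)) (P : Int → Prop)
    (hcl : ∀ z, P z → ∀ c ∈ childD diz z, P c) (k : Nat) (X : List Int)
    (hX : ∀ z ∈ X, P z) : ∀ z ∈ satN diz k X, P z := by
  induction k with
  | zero => exact hX
  | succ k ih => exact pv_forall_foldl_addNew diz P hcl _ _ ih ih

lemma pv_satN_nodup (diz : PySem.Dict Int (List Int)) (k : Nat) (X : List Int) (h : X.Nodup) :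
    (satN diz k X).Nodup := by
  induction k with
  | zero => exact h
  | succ k ih => exact pv_nodup_foldl_addNew diz _ _ ih

lemma pv_satN_cases (diz : PySem.Dict Int (List Int)) (k : Nat) (X : List Int) :
    ∀ z ∈ satN diz k X, z ∈ X ∨ z ∈ allNodes diz := by
  refine pv_satN_forall diz _ ?_ k X (fun z hz => Or.inl hz)
  intro z _ c hc; exact Or.inr (pv_childD_subset_allNodes diz z c hc)

lemma pv_satN_of_fix (diz : PySem.Dict Int (List Int)) (X : List Int)
    (h : satStep diz X = X) : ∀ k, satN diz k X = X := by
  intro k; induction k with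
  | zero => rfl
  | succ k ih => show satStep diz (satN diz k X) = X; rw [ih, h]

lemma pv_satStep_len (diz : PySem.Dict Int (List Int)) (X : List Int)
    (h : satStep diz X ≠ X) : X.length < (satStep diz X).length := by
  obtain ⟨r, hr⟩ := pv_satStep_append diz X
  rcases r with _ | ⟨c, r⟩
  · exact absurd (by simpa using hr) h
  · rw [hr]; simp

lemma pv_Qlem (diz : PySem.Dict Int (List Int)) (X : List Int) (hX : X.Nodup) :
    ∀ k, satStep diz (satN diz k X) = satN diz k X ∨ X.length + k ≤ (satN diz k X).length := by
  intro k; induction k with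
  | zero => right; simp [satN]
  | succ k ih =>
    by_cases hfix : satStep diz (satN diz k X) = satN diz k X
    · left
      show satStep diz (satStep diz (satN diz k X)) = satStep diz (satN diz k X)
      rw [hfix]
      exact hfix
    · rcases ih with h | h
      · exact absurd h hfix
      · right
        have := pv_satStep_len diz _ hfix
        show X.length + (k+1) ≤ (satStep diz (satN diz k X)).length
        omega

lemma pv_satN_fuel_fix (diz : PySem.Dict Int (List Int)) (X : List Int) (hX : X.Nodup) :
    satStep diz (satN diz (satFuel diz) X) = satN diz (satFuel diz) X := by
  rcases pv_Qlem diz X hX (satFuel diz) with h | h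
  · exact h
  · exfalso
    have hnd := pv_satN_nodup diz (satFuel diz) X hX
    have hsub : ∀ z ∈ satN diz (satFuel diz) X, z ∈ X ++ allNodes diz := by
      intro z hz; rcases pv_satN_cases diz _ X z hz with h' | h'
      · exact List.mem_append_left _ h'
      · exact List.mem_append_right _ h'
    have h1 : (satN diz (satFuel diz) X).length = (satN diz (satFuel diz) X).toFinset.card :=
      (List.toFinset_card_of_nodup hnd).symm
    have h2 : (satN diz (satFuel diz) X).toFinset ⊆ (X ++ allNodes diz).toFinset := by
      intro z hz; exact List.mem_toFinset.2 (hsub z (List.mem_toFinset.1 hz))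
    have h3 := Finset.card_le_card h2
    have h4 := List.toFinset_card_le (X ++ allNodes diz)
    rw [List.length_append] at h4
    have hsf : satFuel diz = (allNodes diz).length + 1 := rfl
    omega

-- ---- reachability facts ----

lemma pv_reachR_closed (diz : PySem.Dict Int (List Int)) (n z c : Int)
    (hz : z ∈ reachR diz n) (hc : c ∈ childD diz z) : c ∈ reachR diz n := by
  have hfix := pv_satN_fuel_fix diz [n] (by simp)
  unfold reachR
  rw [← hfix]
  exact pv_satStep_child diz _ z c hz hc

lemma pv_reachP_closed (diz : PySem.Dict Int (List Int)) (n z c : Int)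
    (hz : z ∈ reachP diz n) (hc : c ∈ childD diz z) : c ∈ reachP diz n := by
  have hfix := pv_satN_fuel_fix diz (PySem.List.dedup (childD diz n)) (PySem.List.nodup_dedup _)
  unfold reachP
  rw [← hfix]
  exact pv_satStep_child diz _ z c hz hc

lemma pv_mem_reachR_self (diz : PySem.Dict Int (List Int)) (n : Int) : n ∈ reachR diz n :=
  pv_satN_subset diz _ [n] n (by simp)

lemma pv_reachR_mono (diz : PySem.Dict Int (List Int)) (n z : Int) (hz : z ∈ reachR diz n) :
    ∀ w ∈ reachR diz z, w ∈ reachR diz n := by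
  refine pv_satN_forall diz (fun w => w ∈ reachR diz n) ?_ _ _ ?_
  · intro w hw c hc; exact pv_reachR_closed diz n w c hw hc
  · intro w hw; simp at hw; rw [hw]; exact hz

lemma pv_child_mem_reachR (diz : PySem.Dict Int (List Int)) (n c : Int)
    (hc : c ∈ childD diz n) : c ∈ reachR diz n :=
  pv_reachR_closed diz n n c (pv_mem_reachR_self diz n) hc

lemma pv_child_mem_reachP (diz : PySem.Dict Int (List Int)) (n c : Int)
    (hc : c ∈ childD diz n) : c ∈ reachP diz n :=
  pv_satN_subset diz _ _ c ((PySem.List.mem_dedup _ _).2 hc)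

lemma pv_reachR_subset_reachP (diz : PySem.Dict Int (List Int)) (n c : Int)
    (hc : c ∈ childD diz n) : ∀ w ∈ reachR diz c, w ∈ reachP diz n := by
  refine pv_satN_forall diz (fun w => w ∈ reachP diz n) ?_ _ _ ?_
  · intro w hw c' hc'; exact pv_reachP_closed diz n w c' hw hc'
  · intro w hw; simp at hw; rw [hw]; exact pv_child_mem_reachP diz n c hc

lemma pv_reachR_nonkey (diz : PySem.Dict Int (List Int)) (n : Int)
    (h : diz.get? n = none) : reachR diz n = [n] := by
  have hch : childD diz n = [] := by simp [childD, h]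
  have hfix : satStep diz [n] = [n] := by
    show addNew [n] (childD diz n) = [n]
    rw [hch]; rfl
  exact pv_satN_of_fix diz [n] hfix _

lemma pv_reachR_decomp (diz : PySem.Dict Int (List Int)) (n : Int) (v : List Int)
    (h : diz.get? n = some v) (z : Int) :
    z ∈ reachR diz n ↔ z = n ∨ ∃ c ∈ v, z ∈ reachR diz c := by
  have hch : childD diz n = v := by simp [childD, h]
  constructor
  · refine pv_satN_forall diz (fun z => z = n ∨ ∃ c ∈ v, z ∈ reachR diz c) ?_ _ _ ?_ z
    · rintro w (rfl | ⟨c, hc, hw⟩) c' hc'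
      · exact Or.inr ⟨c', hch ▸ hc', pv_mem_reachR_self diz c'⟩
      · exact Or.inr ⟨c, hc, pv_reachR_closed diz c w c' hw hc'⟩
    · intro w hw; simp at hw; exact Or.inl hw
  · rintro (rfl | ⟨c, hc, hz⟩)
    · exact pv_mem_reachR_self diz z
    · exact pv_reachR_mono diz n c (pv_child_mem_reachR diz n c (hch ▸ hc)) z hz

-- ---- KRL / kmC ----

def KRL (diz : PySem.Dict Int (List Int)) (n : Int) : List Int :=
  (reachR diz n).filter (fun k => (diz.get? k).isSome)

def kmC (diz : PySem.Dict Int (List Int)) (n : Int) : Nat := (KRL diz n).toFinset.card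

lemma pv_mem_KRL (diz : PySem.Dict Int (List Int)) (n z : Int) :
    z ∈ KRL diz n ↔ z ∈ reachR diz n ∧ (diz.get? z).isSome = true := by
  simp [KRL, List.mem_filter]

lemma pv_KRL_mono (diz : PySem.Dict Int (List Int)) (c k z : Int)
    (hk : k ∈ KRL diz c) (hz : z ∈ KRL diz k) : z ∈ KRL diz c := by
  rw [pv_mem_KRL] at hk hz ⊢
  exact ⟨pv_reachR_mono diz c k hk.1 z hz.1, hz.2⟩

lemma pv_KRL_self (diz : PySem.Dict Int (List Int)) (n : Int) (v : List Int)
    (h : diz.get? n = some v) : n ∈ KRL diz n :=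
  (pv_mem_KRL diz n n).2 ⟨pv_mem_reachR_self diz n, by simp [h]⟩

lemma pv_KRL_nonkey (diz : PySem.Dict Int (List Int)) (n : Int)
    (h : diz.get? n = none) : KRL diz n = [] := by
  unfold KRL
  rw [pv_reachR_nonkey diz n h]
  simp [h]

lemma pv_KRL_decomp (diz : PySem.Dict Int (List Int)) (n : Int) (v : List Int)
    (h : diz.get? n = some v) (z : Int) :
    z ∈ KRL diz n ↔ z = n ∨ ∃ c ∈ v, z ∈ KRL diz c := by
  rw [pv_mem_KRL, pv_reachR_decomp diz n v h]
  constructor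
  · rintro ⟨rfl | ⟨c, hc, hz⟩, hkey⟩
    · exact Or.inl rfl
    · exact Or.inr ⟨c, hc, (pv_mem_KRL diz c z).2 ⟨hz, hkey⟩⟩
  · rintro (rfl | ⟨c, hc, hz⟩)
    · exact ⟨Or.inl rfl, by simp [h]⟩
    · rw [pv_mem_KRL] at hz
      exact ⟨Or.inr ⟨c, hc, hz.1⟩, hz.2⟩

lemma pv_km_pos (diz : PySem.Dict Int (List Int)) (n : Int) (v : List Int)
    (h : diz.get? n = some v) : 1 ≤ kmC diz n :=
  Finset.card_pos.2 ⟨n, List.mem_toFinset.2 (pv_KRL_self diz n v h)⟩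

lemma pv_km_lt (diz : PySem.Dict Int (List Int)) (n c : Int) (v : List Int)
    (hget : diz.get? n = some v) (hc : c ∈ v) (hnp : n ∉ reachP diz n) :
    kmC diz c < kmC diz n := by
  have hch : childD diz n = v := by simp [childD, hget]
  apply Finset.card_lt_card
  rw [Finset.ssubset_def]
  constructor
  · intro z hz
    have hz' := (pv_mem_KRL diz c z).1 (List.mem_toFinset.1 hz)
    exact List.mem_toFinset.2 ((pv_mem_KRL diz n z).2
      ⟨pv_reachR_mono diz n c (pv_child_mem_reachR diz n c (hch ▸ hc)) z hz'.1, hz'.2⟩)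
  · intro hsub
    have hn : n ∈ (KRL diz n).toFinset := List.mem_toFinset.2 (pv_KRL_self diz n v hget)
    have hnc := (pv_mem_KRL diz c n).1 (List.mem_toFinset.1 (hsub hn))
    exact hnp (pv_reachR_subset_reachP diz n c (hch ▸ hc) n hnc.1)

lemma pv_km_le (diz : PySem.Dict Int (List Int)) (n : Int) : kmC diz n ≤ diz.items.length := by
  have hsub : (KRL diz n).toFinset ⊆ (diz.items.map Prod.fst).toFinset := by
    intro z hz
    have hz' := (pv_mem_KRL diz n z).1 (List.mem_toFinset.1 hz)
    obtain ⟨v, hv⟩ := Option.isSome_iff_exists.1 hz'.2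
    have := PySem.Dict.mem_items_of_get?_eq_some _ hv
    exact List.mem_toFinset.2 (List.mem_map.2 ⟨(z, v), this, rfl⟩)
  calc kmC diz n ≤ (diz.items.map Prod.fst).toFinset.card := Finset.card_le_card hsub
    _ ≤ (diz.items.map Prod.fst).length := List.toFinset_card_le _
    _ = diz.items.length := List.length_map ..

-- ---- Dict insert facts ----

def Pd (d : PySem.Dict Int (List Int)) (k : Int) (v : List Int) : Prop :=
  d.get? k = some v ∧ ∀ p ∈ d.items, p.1 = k → p.2 = v

lemma pv_map_self {α : Type} (f : α → α) : ∀ l : List α, (∀ p ∈ l, f p = p) → l.map f = l := by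
  intro l
  induction l with
  | nil => intro _; rfl
  | cons a t ih =>
    intro h
    rw [List.map_cons, h a (List.mem_cons_self ..), ih (fun p hp => h p (List.mem_cons_of_mem _ hp))]

lemma pv_insert_eq_self (d : PySem.Dict Int (List Int)) (k : Int) (v : List Int)
    (h : Pd d k v) : d.insert k v = d := by
  obtain ⟨hget, hall⟩ := h
  have hc : d.contains k = true := by rw [PySem.Dict.contains_eq_isSome_get?, hget]; rfl
  apply PySem.Dict.ext
  simp only [PySem.Dict.insert, hc, if_true]
  refine pv_map_self _ d.items ?_
  intro p hp
  by_cases hpk : p.1 = k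
  · rw [if_pos (by simp [hpk])]
    have h2 := hall p hp hpk
    exact Prod.ext (by simp [hpk]) (by simp [h2])
  · rw [if_neg (by simp [hpk])]

lemma pv_get?_none_no_key (d : PySem.Dict Int (List Int)) (k : Int)
    (h : d.get? k = none) : ∀ p ∈ d.items, p.1 ≠ k := by
  intro p hp
  have hfind : d.items.find? (fun p => p.1 == k) = none := by
    simp only [PySem.Dict.get?] at h
    exact Option.map_eq_none_iff.1 h
  have := List.find?_eq_none.1 hfind p hp
  simpa using this

lemma pv_Pd_insert_self (d : PySem.Dict Int (List Int)) (k : Int) (v : List Int) :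
    Pd (d.insert k v) k v := by
  refine ⟨PySem.Dict.get?_insert_self d k v, ?_⟩
  intro p hp hk
  by_cases hc : d.contains k = true
  · simp only [PySem.Dict.insert, hc, if_true] at hp
    obtain ⟨q, hq, hfq⟩ := List.mem_map.1 hp
    by_cases h : (q.1 == k) = true
    · rw [if_pos h] at hfq; rw [← hfq]
    · rw [if_neg h] at hfq; rw [← hfq] at hk; simp [hk] at h
  · have hnone : d.get? k = none := by
      have hcontains := PySem.Dict.contains_eq_isSome_get? d k
      cases hgk : d.get? k with
      | none => rfl
      | some w => rw [hgk] at hcontains; simp at hcontains; exact absurd hcontains hc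
    simp only [PySem.Dict.insert, hc, if_false] at hp
    rcases List.mem_append.1 hp with hp | hp
    · exact absurd hk (pv_get?_none_no_key d k hnone p hp)
    · simp at hp; rw [hp]

lemma pv_Pd_insert_of_ne (d : PySem.Dict Int (List Int)) (k : Int) (v : List Int)
    (k' : Int) (v' : List Int) (hne : k' ≠ k) (h : Pd d k' v') : Pd (d.insert k v) k' v' := by
  obtain ⟨hget, hall⟩ := h
  refine ⟨by rw [PySem.Dict.get?_insert_of_ne] <;> first | exact hget | exact hne, ?_⟩
  intro p hp hk'
  by_cases hc : d.contains k = true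
  · simp only [PySem.Dict.insert, hc, if_true] at hp
    obtain ⟨q, hq, hfq⟩ := List.mem_map.1 hp
    by_cases h : (q.1 == k) = true
    · rw [if_pos h] at hfq
      rw [← hfq] at hk'
      simp at hk'
      exact absurd hk'.symm hne
    · rw [if_neg h] at hfq; rw [← hfq]; exact hall _ hq (by rw [hfq]; exact hk')
  · simp only [PySem.Dict.insert, hc, if_false] at hp
    rcases List.mem_append.1 hp with hp | hp
    · exact hall _ hp hk'
    · simp at hp; rw [hp] at hk'; simp at hk'; exact absurd hk'.symm hne

-- ---- HInv and the no-op lemma for A on already-handled nodes ----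

def HInv (diz d : PySem.Dict Int (List Int)) (vis : PySem.Set Int) : Prop :=
  ∀ k ∈ vis, ∃ v, diz.get? k = some v ∧ Pd d k v

lemma pv_noop (diz : PySem.Dict Int (List Int)) : ∀ (f : Nat) (n : Int) (d : PySem.Dict Int (List Int)),
    (∀ k ∈ reachR diz n, ∀ v, diz.get? k = some v → Pd d k v) →
    genAux diz f n d = d := by
  intro f
  induction f with
  | zero => intro n d _; rfl
  | succ f ih =>
    intro n d hH
    cases hget : diz.get? n with
    | none => simp [genAux, hget]
    | some v =>
      have hch : childD diz n = v := by simp [childD, hget]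
      have hPd : Pd d n v := hH n (pv_mem_reachR_self diz n) v hget
      have hins : d.insert n v = d := pv_insert_eq_self d n v hPd
      simp only [genAux, hget, hins]
      have hsub : ∀ (l : List Int), (∀ c ∈ l, c ∈ v) →
          l.foldl (fun acc c => genAux diz f c acc) d = d := by
        intro l
        induction l with
        | nil => intro _; rfl
        | cons c t iht =>
          intro hl
          rw [List.foldl_cons, ih c d ?_]
          · exact iht (fun c' h' => hl c' (List.mem_cons_of_mem _ h'))
          · intro k hk w hw
            exact hH k (pv_reachR_mono diz n c
              (pv_child_mem_reachR diz n c (hch ▸ hl c (List.mem_cons_self ..))) k hk) w hw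
      exact hsub v (fun _ h => h)

-- ---- fuel stability of visitC ----

def keysD (diz : PySem.Dict Int (List Int)) : List Int := PySem.List.dedup (diz.items.map Prod.fst)

def uCnt (diz : PySem.Dict Int (List Int)) (vis : PySem.Set Int) : Nat :=
  ((keysD diz).filter (fun k => !(PySem.Set.contains vis k))).length

lemma pv_filter_length_mono {α : Type} (p q : α → Bool) (h : ∀ a, p a = true → q a = true) :
    ∀ l : List α, (l.filter p).length ≤ (l.filter q).length := by
  intro l
  induction l with
  | nil => simp
  | cons a t ih =>
    cases hp : p a
    · cases hq : q a <;> simp [hp, hq] <;> omega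
    · have := h a hp; simp [hp, this]; omega

lemma pv_uCnt_le (diz : PySem.Dict Int (List Int)) (vis : PySem.Set Int) :
    uCnt diz vis ≤ (keysD diz).length := List.length_filter_le _ _

lemma pv_keysD_le (diz : PySem.Dict Int (List Int)) : (keysD diz).length ≤ diz.items.length := by
  have hnd : (keysD diz).Nodup := PySem.List.nodup_dedup _
  have hsub : (keysD diz).toFinset ⊆ (diz.items.map Prod.fst).toFinset := by
    intro z hz
    exact List.mem_toFinset.2 ((PySem.List.mem_dedup _ _).1 (List.mem_toFinset.1 hz))
  calc (keysD diz).length = (keysD diz).toFinset.card := (List.toFinset_card_of_nodup hnd).symm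
    _ ≤ (diz.items.map Prod.fst).toFinset.card := Finset.card_le_card hsub
    _ ≤ (diz.items.map Prod.fst).length := List.toFinset_card_le _
    _ = diz.items.length := List.length_map ..

lemma pv_uCnt_antitone (diz : PySem.Dict Int (List Int)) (s s' : PySem.Set Int)
    (h : ∀ z ∈ s, z ∈ s') : uCnt diz s' ≤ uCnt diz s := by
  apply pv_filter_length_mono
  intro a ha
  simp only [Bool.not_eq_true'] at ha ⊢
  cases hb : PySem.Set.contains s a
  · rfl
  · have hcon := (pv_setc_iff s' a).2 (h a ((pv_setc_iff s a).1 hb))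
    rw [ha] at hcon; cases hcon

lemma pv_mem_keysD (diz : PySem.Dict Int (List Int)) (n : Int) (v : List Int)
    (h : diz.get? n = some v) : n ∈ keysD diz := by
  have := PySem.Dict.mem_items_of_get?_eq_some _ h
  exact (PySem.List.mem_dedup _ _).2 (List.mem_map.2 ⟨(n, v), this, rfl⟩)

lemma pv_contains_append_singleton (vis : PySem.Set Int) (n k : Int) :
    PySem.Set.contains (vis ++ [n]) k = (PySem.Set.contains vis k || (k == n)) := by
  cases hb : PySem.Set.contains vis k
  · cases hc : (k == n)
    · have h1 : k ∉ vis := fun h => by rw [(pv_setc_iff vis k).2 h] at hb; cases hb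
      have h2 : k ≠ n := by simpa using hc
      have h3 : k ∉ vis ++ [n] := by simp [h1, h2]
      rw [pv_setc_false h3]; rfl
    · have h2 : k = n := by simpa using hc
      rw [(pv_setc_iff _ _).2 (by simp [h2])]; rfl
  · rw [(pv_setc_iff _ _).2 (List.mem_append_left _ ((pv_setc_iff _ _).1 hb))]; rfl

lemma pv_sum_map_filter_le {α : Type} (wt : α → Nat) (q : α → Bool) :
    ∀ l : List α, ((l.filter q).map wt).sum ≤ (l.map wt).sum := by
  intro l
  induction l with
  | nil => simp
  | cons a t ih => cases hq : q a <;> simp [hq] <;> omega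

lemma pv_sum_map_filter_lt {α : Type} (wt : α → Nat) (q r : α → Bool) :
    ∀ (l : List α) (p0 : α), p0 ∈ l → r p0 = true → q p0 = false →
    ((l.filter (fun a => q a && r a)).map wt).sum + wt p0 ≤ ((l.filter r).map wt).sum := by
  intro l
  induction l with
  | nil => intro p0 h; cases h
  | cons a t ih =>
    intro p0 hp hr hq
    rcases List.mem_cons.1 hp with rfl | hpt
    · have h1 : ((t.filter (fun a => q a && r a)).map wt).sum ≤ ((t.filter r).map wt).sum := by
        rw [← List.filter_filter]
        exact pv_sum_map_filter_le wt q _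
      have hl : List.filter (fun x => q x && r x) (p0 :: t) = List.filter (fun x => q x && r x) t := by
        simp [List.filter_cons, hq]
      have hrr : List.filter r (p0 :: t) = p0 :: List.filter r t := by
        simp [List.filter_cons, hr]
      rw [hl, hrr]
      simp only [List.map_cons, List.sum_cons]
      omega
    · have hstep := ih p0 hpt hr hq
      cases hra : r a with
      | false =>
        have hfl : List.filter (fun x => q x && r x) (a :: t) = List.filter (fun x => q x && r x) t := by
          simp [List.filter_cons, hra]
        have hfr : List.filter r (a :: t) = List.filter r t := by
          simp [List.filter_cons, hra]
        rw [hfl, hfr]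
        exact hstep
      | true =>
        cases hqa : q a with
        | false =>
          have hfl : List.filter (fun x => q x && r x) (a :: t) = List.filter (fun x => q x && r x) t := by
            simp [List.filter_cons, hqa]
          have hfr : List.filter r (a :: t) = a :: List.filter r t := by
            simp [List.filter_cons, hra]
          rw [hfl, hfr]
          simp only [List.map_cons, List.sum_cons]
          omega
        | true =>
          have hfl : List.filter (fun x => q x && r x) (a :: t) = a :: List.filter (fun x => q x && r x) t := by
            simp [List.filter_cons, hqa, hra]
          have hfr : List.filter r (a :: t) = a :: List.filter r t := by
            simp [List.filter_cons, hra]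
          rw [hfl, hfr]
          simp only [List.map_cons, List.sum_cons]
          omega

lemma pv_uCnt_append_lt (diz : PySem.Dict Int (List Int)) (vis : PySem.Set Int) (n : Int)
    (hk : n ∈ keysD diz) (hn : n ∉ vis) : uCnt diz (vis ++ [n]) < uCnt diz vis := by
  unfold uCnt
  have hcong : (keysD diz).filter (fun k => !(PySem.Set.contains (vis ++ [n]) k))
      = (keysD diz).filter (fun k => (!(k == n)) && (!(PySem.Set.contains vis k))) := by
    apply List.filter_congr
    intro k _
    rw [pv_contains_append_singleton]
    cases PySem.Set.contains vis k <;> cases hkn : (k == n) <;> simp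
  rw [hcong]
  have hlen : ∀ l : List Int, (l.map (fun _ => (1:Nat))).sum = l.length := by
    intro l; induction l with
    | nil => simp
    | cons a t ih => simp [ih]; omega
  have key := pv_sum_map_filter_lt (fun _ => (1:Nat)) (fun k => !(k == n))
    (fun k => !(PySem.Set.contains vis k)) (keysD diz) n hk
    (by simpa using hn) (by simp)
  have key2 : ((keysD diz).filter (fun k => (!(k == n)) && (!(PySem.Set.contains vis k)))).length + 1
      ≤ ((keysD diz).filter (fun k => !(PySem.Set.contains vis k))).length := by
    simpa [hlen] using key
  omega

lemma pv_stMain (diz : PySem.Dict Int (List Int)) : ∀ (K f g : Nat) (n : Int) (vis : PySem.Set Int) (d : PySem.Dict Int (List Int)),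
    uCnt diz vis ≤ K → K < f → K < g →
    visitC diz f n (vis, d) = visitC diz g n (vis, d)
    ∧ ∀ z ∈ vis, z ∈ (visitC diz f n (vis, d)).1 := by
  intro K
  induction K with
  | zero =>
    intro f g n vis d hu hf hg
    obtain ⟨f', rfl⟩ : ∃ f', f = f' + 1 := ⟨f - 1, by omega⟩
    obtain ⟨g', rfl⟩ : ∃ g', g = g' + 1 := ⟨g - 1, by omega⟩
    by_cases hnv : n ∈ vis
    · rw [pv_visitC_skip diz f' n vis d hnv, pv_visitC_skip diz g' n vis d hnv]
      exact ⟨rfl, fun z hz => hz⟩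
    · cases hget : diz.get? n with
      | none =>
        rw [pv_visitC_none diz f' n vis d hnv hget, pv_visitC_none diz g' n vis d hnv hget]
        exact ⟨rfl, fun z hz => hz⟩
      | some v =>
        exfalso
        have hkn : n ∈ keysD diz := pv_mem_keysD diz n v hget
        have hmem : n ∈ (keysD diz).filter (fun k => !(PySem.Set.contains vis k)) :=
          List.mem_filter.2 ⟨hkn, by simpa using hnv⟩
        have := List.length_pos_of_mem hmem
        unfold uCnt at hu
        omega
  | succ K ih =>
    intro f g n vis d hu hf hg
    obtain ⟨f', rfl⟩ : ∃ f', f = f' + 1 := ⟨f - 1, by omega⟩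
    obtain ⟨g', rfl⟩ : ∃ g', g = g' + 1 := ⟨g - 1, by omega⟩
    by_cases hnv : n ∈ vis
    · rw [pv_visitC_skip diz f' n vis d hnv, pv_visitC_skip diz g' n vis d hnv]
      exact ⟨rfl, fun z hz => hz⟩
    · have hn : n ∉ vis := hnv
      cases hget : diz.get? n with
      | none =>
        rw [pv_visitC_none diz f' n vis d hnv hget, pv_visitC_none diz g' n vis d hnv hget]
        exact ⟨rfl, fun z hz => hz⟩
      | some v =>
        have hkn : n ∈ keysD diz := pv_mem_keysD diz n v hget
        have hu1 : uCnt diz (vis ++ [n]) ≤ K := by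
          have := pv_uCnt_append_lt diz vis n hkn hn; omega
        have inner : ∀ (cs : List Int) (st : PySem.Set Int × PySem.Dict Int (List Int)),
            uCnt diz st.1 ≤ K →
            cs.foldl (fun st' c => visitC diz f' c st') st = cs.foldl (fun st' c => visitC diz g' c st') st
            ∧ ∀ z ∈ st.1, z ∈ (cs.foldl (fun st' c => visitC diz f' c st') st).1 := by
          intro cs
          induction cs with
          | nil => intro st hst; exact ⟨rfl, fun z hz => hz⟩
          | cons c t iht =>
            rintro ⟨sv, sd⟩ hst
            obtain ⟨heq, hmono⟩ := ih f' g' c sv sd hst (by omega) (by omega)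
            have hst' : uCnt diz (visitC diz f' c (sv, sd)).1 ≤ K :=
              le_trans (pv_uCnt_antitone diz sv _ hmono) hst
            obtain ⟨heqt, hmonot⟩ := iht (visitC diz f' c (sv, sd)) hst'
            constructor
            · rw [List.foldl_cons, List.foldl_cons, ← heq]
              exact heqt
            · intro z hz
              rw [List.foldl_cons]
              exact hmonot z (hmono z hz)
        have hUf := pv_visitC_step diz f' n vis d v hn hget
        have hUg := pv_visitC_step diz g' n vis d v hn hget
        constructor
        · rw [hUf, hUg]; exact (inner v _ hu1).1
        · intro z hz
          rw [hUf]
          exact (inner v _ hu1).2 z (List.mem_append_left _ hz)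

lemma pv_stFuel (diz : PySem.Dict Int (List Int)) (f g : Nat) (n : Int) (vis : PySem.Set Int)
    (d : PySem.Dict Int (List Int)) (hf : diz.items.length < f) (hg : diz.items.length < g) :
    visitC diz f n (vis, d) = visitC diz g n (vis, d) := by
  refine (pv_stMain diz (keysD diz).length f g n vis d (pv_uCnt_le diz vis) ?_ ?_).1 <;>
    · have := pv_keysD_le diz; omega

lemma pv_foldCong (diz : PySem.Dict Int (List Int)) (f g : Nat)
    (hf : diz.items.length < f) (hg : diz.items.length < g) :
    ∀ (cs : List Int) (st : PySem.Set Int × PySem.Dict Int (List Int)),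
    cs.foldl (fun st' c => visitC diz f c st') st = cs.foldl (fun st' c => visitC diz g c st') st := by
  intro cs
  induction cs with
  | nil => intro st; rfl
  | cons c t ih =>
    rintro ⟨sv, sd⟩
    rw [List.foldl_cons, List.foldl_cons, pv_stFuel diz f g c sv sd hf hg]
    exact ih _

-- ---- the aligned equivalence: A's recursion vs the memoized DFS ----

lemma pv_lemV_stop (diz : PySem.Dict Int (List Int)) (f : Nat) (n : Int) (vis : PySem.Set Int)
    (d : PySem.Dict Int (List Int)) (hH : HInv diz d vis)
    (hstop : (n ∈ vis ∧ ∀ z ∈ KRL diz n, z ∈ vis) ∨ diz.get? n = none) :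
    genAux diz f n d = d ∧ visitC diz f n (vis, d) = (vis, d) := by
  rcases hstop with ⟨hnvis, hK⟩ | hget
  · constructor
    · apply pv_noop
      intro k hk w hw
      have hkK : k ∈ vis := hK k ((pv_mem_KRL diz n k).2 ⟨hk, by simp [hw]⟩)
      obtain ⟨v', hv', hPd⟩ := hH k hkK
      rw [hw] at hv'
      injection hv' with hveq
      rw [hveq]
      exact hPd
    · cases f with
      | zero => rfl
      | succ f => exact pv_visitC_skip diz f n vis d hnvis
  · constructor
    · apply pv_noop
      intro k hk w hw
      rw [pv_reachR_nonkey diz n hget] at hk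
      simp at hk
      rw [hk] at hw
      rw [hget] at hw
      cases hw
    · cases f with
      | zero => rfl
      | succ f =>
        by_cases hv : n ∈ vis
        · exact pv_visitC_skip diz f n vis d hv
        · exact pv_visitC_none diz f n vis d hv hget

lemma pv_lemV (diz : PySem.Dict Int (List Int)) : ∀ (N f : Nat) (n : Int) (vis : PySem.Set Int) (d : PySem.Dict Int (List Int)) (G : List Int),
    kmC diz n ≤ N → N < f →
    (∀ k ∈ reachR diz n, k ∉ reachP diz k) →
    HInv diz d vis →
    (∀ k ∈ vis, k ∈ G ∨ ∀ z ∈ KRL diz k, z ∈ vis) →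
    ((diz.get? n).isSome = true → ∀ g ∈ G, n ∈ reachP diz g) →
    genAux diz f n d = (visitC diz f n (vis, d)).2
    ∧ (∀ z, z ∈ (visitC diz f n (vis, d)).1 ↔ z ∈ vis ∨ z ∈ KRL diz n)
    ∧ HInv diz (visitC diz f n (vis, d)).2 (visitC diz f n (vis, d)).1 := by
  intro N
  induction N with
  | zero =>
    intro f n vis d G hkm hf hPre hH hG1 hG2
    by_cases hnvis : n ∈ vis
    · obtain ⟨v', hv', _⟩ := hH n hnvis
      have hisn : (diz.get? n).isSome = true := by simp [hv']
      have hnG : n ∉ G := fun hg => hPre n (pv_mem_reachR_self diz n) (hG2 hisn n hg)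
      have hKsub : ∀ z ∈ KRL diz n, z ∈ vis := (hG1 n hnvis).resolve_left hnG
      obtain ⟨h1, h2⟩ := pv_lemV_stop diz f n vis d hH (Or.inl ⟨hnvis, hKsub⟩)
      rw [h1, h2]
      exact ⟨rfl, fun z => ⟨Or.inl, fun h => h.elim id (hKsub z)⟩, hH⟩
    · cases hget : diz.get? n with
      | none =>
        obtain ⟨h1, h2⟩ := pv_lemV_stop diz f n vis d hH (Or.inr hget)
        rw [h1, h2]
        refine ⟨rfl, fun z => ?_, hH⟩
        rw [pv_KRL_nonkey diz n hget]
        simp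
      | some v =>
        exfalso
        have := pv_km_pos diz n v hget
        omega
  | succ N ih =>
    intro f n vis d G hkm hf hPre hH hG1 hG2
    by_cases hnvis : n ∈ vis
    · obtain ⟨v', hv', _⟩ := hH n hnvis
      have hisn : (diz.get? n).isSome = true := by simp [hv']
      have hnG : n ∉ G := fun hg => hPre n (pv_mem_reachR_self diz n) (hG2 hisn n hg)
      have hKsub : ∀ z ∈ KRL diz n, z ∈ vis := (hG1 n hnvis).resolve_left hnG
      obtain ⟨h1, h2⟩ := pv_lemV_stop diz f n vis d hH (Or.inl ⟨hnvis, hKsub⟩)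
      rw [h1, h2]
      exact ⟨rfl, fun z => ⟨Or.inl, fun h => h.elim id (hKsub z)⟩, hH⟩
    · cases hget : diz.get? n with
      | none =>
        obtain ⟨h1, h2⟩ := pv_lemV_stop diz f n vis d hH (Or.inr hget)
        rw [h1, h2]
        refine ⟨rfl, fun z => ?_, hH⟩
        rw [pv_KRL_nonkey diz n hget]
        simp
      | some v =>
        obtain ⟨f', rfl⟩ : ∃ f', f = f' + 1 := ⟨f - 1, by omega⟩
        have hcF := pv_setc_false hnvis
        have hch : childD diz n = v := by simp [childD, hget]
        have hnp : n ∉ reachP diz n := hPre n (pv_mem_reachR_self diz n)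
        have hisn : (diz.get? n).isSome = true := by simp [hget]
        have hkmc : ∀ c ∈ v, kmC diz c ≤ N := by
          intro c hcv
          have := pv_km_lt diz n c v hget hcv hnp
          omega
        have hPrec : ∀ c ∈ v, ∀ k ∈ reachR diz c, k ∉ reachP diz k := fun c hcv k hk =>
          hPre k (pv_reachR_mono diz n c (pv_child_mem_reachR diz n c (hch ▸ hcv)) k hk)
        have hG2c : ∀ c ∈ v, (diz.get? c).isSome = true → ∀ g ∈ n :: G, c ∈ reachP diz g := by
          intro c hcv _ g hg
          rcases List.mem_cons.1 hg with rfl | hgG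
          · exact pv_child_mem_reachP diz g c (hch ▸ hcv)
          · exact pv_reachP_closed diz g n c (hG2 hisn g hgG) (hch ▸ hcv)
        have inner : ∀ (cs : List Int), (∀ c ∈ cs, c ∈ v) →
            ∀ (vis' : PySem.Set Int) (d' : PySem.Dict Int (List Int)),
            HInv diz d' vis' →
            (∀ k ∈ vis', k ∈ n :: G ∨ ∀ z ∈ KRL diz k, z ∈ vis') →
            (cs.foldl (fun acc c => genAux diz f' c acc) d'
              = (cs.foldl (fun st' c => visitC diz f' c st') (vis', d')).2)
            ∧ (∀ z, z ∈ (cs.foldl (fun st' c => visitC diz f' c st') (vis', d')).1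
                ↔ z ∈ vis' ∨ ∃ c ∈ cs, z ∈ KRL diz c)
            ∧ HInv diz (cs.foldl (fun st' c => visitC diz f' c st') (vis', d')).2
                (cs.foldl (fun st' c => visitC diz f' c st') (vis', d')).1 := by
          intro cs
          induction cs with
          | nil =>
            intro _ vis' d' hH' _
            exact ⟨rfl, fun z => by simp, hH'⟩
          | cons c t iht =>
            intro hsub vis' d' hH' hG1'
            have hcv : c ∈ v := hsub c (List.mem_cons_self ..)
            obtain ⟨e1, e2, e3⟩ := ih f' c vis' d' (n :: G) (hkmc c hcv) (by omega)
              (hPrec c hcv) hH' hG1' (fun hs g hg => hG2c c hcv hs g hg)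
            have hviss : ∀ z ∈ vis', z ∈ (visitC diz f' c (vis', d')).1 :=
              fun z hz => (e2 z).2 (Or.inl hz)
            have hG1'' : ∀ k ∈ (visitC diz f' c (vis', d')).1,
                k ∈ n :: G ∨ ∀ z ∈ KRL diz k, z ∈ (visitC diz f' c (vis', d')).1 := by
              intro k hk
              rcases (e2 k).1 hk with hk' | hkK
              · rcases hG1' k hk' with h | h
                · exact Or.inl h
                · exact Or.inr (fun z hz => hviss z (h z hz))
              · exact Or.inr (fun z hz => (e2 z).2 (Or.inr (pv_KRL_mono diz c k z hkK hz)))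
            obtain ⟨f1, f2, f3⟩ := iht (fun c' h' => hsub c' (List.mem_cons_of_mem _ h'))
              (visitC diz f' c (vis', d')).1 (visitC diz f' c (vis', d')).2 e3 hG1''
            refine ⟨?_, ?_, ?_⟩
            · rw [List.foldl_cons, List.foldl_cons, e1]
              rw [f1]
            · intro z
              rw [List.foldl_cons]
              have f2' : z ∈ ((t.foldl (fun st' c => visitC diz f' c st')
                  (visitC diz f' c (vis', d'))).1)
                  ↔ z ∈ (visitC diz f' c (vis', d')).1 ∨ ∃ c' ∈ t, z ∈ KRL diz c' := by
                have := f2 z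
                rwa [Prod.mk.eta] at this
              rw [f2', e2 z]
              constructor
              · rintro ((hz | hz) | ⟨c', hc', hz⟩)
                · exact Or.inl hz
                · exact Or.inr ⟨c, List.mem_cons_self .., hz⟩
                · exact Or.inr ⟨c', List.mem_cons_of_mem _ hc', hz⟩
              · rintro (hz | ⟨c', hc', hz⟩)
                · exact Or.inl (Or.inl hz)
                · rcases List.mem_cons.1 hc' with rfl | hc't
                  · exact Or.inl (Or.inr hz)
                  · exact Or.inr ⟨c', hc't, hz⟩
            · rw [List.foldl_cons]
              have := f3
              rwa [Prod.mk.eta] at this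
        have hH1 : HInv diz (d.insert n v) (vis ++ [n]) := by
          intro k hk
          rcases List.mem_append.1 hk with hkv | hkn
          · obtain ⟨w, hw, hPd⟩ := hH k hkv
            exact ⟨w, hw, pv_Pd_insert_of_ne d n v k w (fun he => hnvis (he ▸ hkv)) hPd⟩
          · simp at hkn
            rw [hkn]
            exact ⟨v, hget, pv_Pd_insert_self d n v⟩
        have hG1x : ∀ k ∈ vis ++ [n], k ∈ n :: G ∨ ∀ z ∈ KRL diz k, z ∈ vis ++ [n] := by
          intro k hk
          rcases List.mem_append.1 hk with hkv | hkn
          · rcases hG1 k hkv with h | h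
            · exact Or.inl (List.mem_cons_of_mem _ h)
            · exact Or.inr (fun z hz => List.mem_append_left _ (h z hz))
          · simp at hkn
            rw [hkn]
            exact Or.inl (List.mem_cons_self ..)
        obtain ⟨F1, F2, F3⟩ := inner v (fun _ h => h) (vis ++ [n]) (d.insert n v) hH1 hG1x
        have hgA : genAux diz (f' + 1) n d
            = v.foldl (fun acc c => genAux diz f' c acc) (d.insert n v) := by
          simp [genAux, hget]
        have hgC := pv_visitC_step diz f' n vis d v hnvis hget
        refine ⟨?_, ?_, ?_⟩
        · rw [hgA, hgC]; exact F1
        · intro z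
          rw [hgC, F2 z]
          have hd := pv_KRL_decomp diz n v hget z
          simp only [List.mem_append, List.mem_singleton, hd]
          tauto
        · rw [hgC]; exact F3

-- ---- the stack loop computes the fold of the memoized DFS ----

def wCnt (diz : PySem.Dict Int (List Int)) (vis : PySem.Set Int) : Nat :=
  ((diz.items.filter (fun p => !(PySem.Set.contains vis p.1))).map (fun p => 1 + p.2.length)).sum

lemma pv_wdec (diz : PySem.Dict Int (List Int)) (vis : PySem.Set Int) (n : Int) (v : List Int)
    (hget : diz.get? n = some v) (hn : n ∉ vis) :
    wCnt diz (vis ++ [n]) + (1 + v.length) ≤ wCnt diz vis := by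
  unfold wCnt
  have hcong : diz.items.filter (fun p => !(PySem.Set.contains (vis ++ [n]) p.1))
      = diz.items.filter (fun p => (!(p.1 == n)) && (!(PySem.Set.contains vis p.1))) := by
    apply List.filter_congr
    intro p _
    rw [pv_contains_append_singleton]
    cases PySem.Set.contains vis p.1 <;> cases (p.1 == n) <;> simp
  rw [hcong]
  have hp0 : (n, v) ∈ diz.items := PySem.Dict.mem_items_of_get?_eq_some _ hget
  have key := pv_sum_map_filter_lt (fun p : Int × List Int => 1 + p.2.length)
    (fun p => !(p.1 == n)) (fun p => !(PySem.Set.contains vis p.1)) diz.items (n, v) hp0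
    (by simpa using hn) (by simp)
  simpa using key

lemma pv_lemS (diz : PySem.Dict Int (List Int)) : ∀ (f : Nat) (s : List Int) (vis : PySem.Set Int) (d : PySem.Dict Int (List Int)),
    s.length + wCnt diz vis < f →
    bLoop diz f s vis d = s.foldl (fun st m => visitC diz (diz.items.length + 2) m st) (vis, d) := by
  intro f
  induction f with
  | zero => intro s vis d h; exact absurd h (Nat.not_lt_zero _)
  | succ f ihf =>
    intro s vis d hm
    cases s with
    | nil => rfl
    | cons m t =>
      by_cases hnv : m ∈ vis
      · have h1 : bLoop diz (f+1) (m::t) vis d = bLoop diz f t vis d := by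
          simp [bLoop, hnv]
        rw [h1, ihf t vis d (by simp at hm; omega), List.foldl_cons]
        have h2 : visitC diz (diz.items.length + 2) m (vis, d) = (vis, d) :=
          pv_visitC_skip diz (diz.items.length + 1) m vis d hnv
        rw [h2]
      · cases hget : diz.get? m with
        | none =>
          have h1 : bLoop diz (f+1) (m::t) vis d = bLoop diz f t vis d := by
            simp [bLoop, hnv, hget]
          rw [h1, ihf t vis d (by simp at hm; omega), List.foldl_cons]
          have h2 : visitC diz (diz.items.length + 2) m (vis, d) = (vis, d) :=
            pv_visitC_none diz (diz.items.length + 1) m vis d hnv hget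
          rw [h2]
        | some v =>
          have hcF := pv_setc_false hnv
          have hadd : PySem.Set.add vis m = vis ++ [m] := by
            simp [PySem.Set.add, PySem.Set.contains] at hcF ⊢
            simp [hcF]
          have h1 : bLoop diz (f+1) (m::t) vis d
              = bLoop diz f (v ++ t) (vis ++ [m]) (d.insert m v) := by
            simp [bLoop, hnv, hget, hadd]
          have harith : (v ++ t).length + wCnt diz (vis ++ [m]) < f := by
            have := pv_wdec diz vis m v hget hnv
            rw [List.length_append]
            simp at hm
            omega
          rw [h1, ihf _ _ _ harith, List.foldl_append, List.foldl_cons]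
          have h2 : visitC diz (diz.items.length + 2) m (vis, d)
              = v.foldl (fun st' c => visitC diz (diz.items.length + 1) c st') (vis ++ [m], d.insert m v) :=
            pv_visitC_step diz (diz.items.length + 1) m vis d v hnv hget
          rw [h2]
          congr 1
          exact pv_foldCong diz (diz.items.length + 2) (diz.items.length + 1)
            (by omega) (by omega) v _

-- ---- assembly ----

lemma pv_foldl_len (l : List (Int × List Int)) : ∀ a : Nat,
    l.foldl (fun a p => a + 1 + p.2.length) a = a + (l.map (fun p => 1 + p.2.length)).sum := by
  induction l with
  | nil => intro a; simp
  | cons p t ih => intro a; rw [List.foldl_cons, ih]; simp; omega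

-- ===== VERDICT (by name: the statement is the Claim_ definition above) =====
theorem genera_ricors_spec : Claim_equal_genera_ricors := by
  unfold Claim_equal_genera_ricors
  intro diz x nd _hdom hPre
  unfold Spec_genera_ricors genera_ricors genera_ricors_alt
  unfold Pre_genera_ricors at hPre
  congr 1
  have hw0 : wCnt (PySem.Dict.mk diz) PySem.Set.empty = (diz.map (fun p => 1 + p.2.length)).sum := by
    unfold wCnt
    have hfe : (PySem.Dict.mk diz).items.filter (fun p => !(PySem.Set.contains PySem.Set.empty p.1))
        = diz := by
      apply List.filter_eq_self.2
      intro a _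
      rfl
    rw [hfe]
  have hb : bFuel diz = (diz.map (fun p => 1 + p.2.length)).sum + 2 := by
    unfold bFuel
    rw [pv_foldl_len]
    omega
  have hfuel : ([x] : List Int).length + wCnt (PySem.Dict.mk diz) PySem.Set.empty < bFuel diz := by
    rw [hw0, hb]
    simp only [List.length_cons, List.length_nil]
    omega
  have hS := pv_lemS (PySem.Dict.mk diz) (bFuel diz) [x] PySem.Set.empty (PySem.Dict.mk nd) hfuel
  rw [hS]
  simp only [List.foldl_cons, List.foldl_nil]
  have hkm : kmC (PySem.Dict.mk diz) x ≤ diz.length + 1 := by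
    have h := pv_km_le (PySem.Dict.mk diz) x
    have h2 : (PySem.Dict.mk diz).items.length = diz.length := rfl
    omega
  have hV := pv_lemV (PySem.Dict.mk diz) (diz.length + 1) (diz.length + 2) x PySem.Set.empty (PySem.Dict.mk nd) []
    hkm (by omega) hPre
    (by intro k hk; simp [PySem.Set.empty] at hk)
    (by intro k hk; simp [PySem.Set.empty] at hk)
    (by intro _ g hg; simp at hg)
  exact hV.1

theorem genera_ricors_raises : Claim_raises_genera_ricors := by
  unfold Claim_raises_genera_ricors
  refine ⟨?_, by decide⟩
  intro diz x nd _hdom hR hPre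
  unfold Raises_genera_ricors at hR
  unfold Pre_genera_ricors at hPre
  obtain ⟨k, hk1, hk2⟩ := hR
  exact hPre k hk1 hk2

-- self-check: the stated raise witness really lies inside Raises_ (a projection of the claim)
theorem genera_ricors_raises_witness_ok :
    Raises_genera_ricors (pvRaiseWitness_genera_ricors.1) (pvRaiseWitness_genera_ricors.2.1)
      (pvRaiseWitness_genera_ricors.2.2) :=
  genera_ricors_raises.2.2.1
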